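-- pv_equiv track=rewrite | github.com/shg9411/algo | job/perg/1.py | solution
-- ===== SOURCE A (Python) =====
-- def solution(day, k):
--     date_per_month = [31, 28, 31, 30, 31, 30, 31, 31, 30, 31, 30, 31]
--     weekend = (5, 6)
--     answer = []
--     for date in date_per_month:
--         if (day+k-1) % 7 in weekend:
--             answer.append(1)
--         else:
--             answer.append(0)
--         day += date % 7
--     return answer
-- ===== SOURCE B (Python) =====
-- def solution(day, k):
--     date_per_month = [31, 28, 31, 30, 31, 30, 31, 31, 30, 31, 30, 31]
--     offsets = [0]
--     for d in date_per_month[:-1]: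
--         offsets.append(offsets[-1] + d % 7)
--     return [1 if (day + off + k - 1) % 7 in (5, 6) else 0 for off in offsets]
-- ===== Notes on version B (the rewrite author's own statement) =====
-- stated objective: alternative
-- what changed: Replaces the single accumulate-and-test loop carrying a mutating day variable by two separate passes: first a prefix-sum table of month-start weekday offsets, then a stateless comprehension mapping each offset to 0/1.
import Mathlib
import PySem

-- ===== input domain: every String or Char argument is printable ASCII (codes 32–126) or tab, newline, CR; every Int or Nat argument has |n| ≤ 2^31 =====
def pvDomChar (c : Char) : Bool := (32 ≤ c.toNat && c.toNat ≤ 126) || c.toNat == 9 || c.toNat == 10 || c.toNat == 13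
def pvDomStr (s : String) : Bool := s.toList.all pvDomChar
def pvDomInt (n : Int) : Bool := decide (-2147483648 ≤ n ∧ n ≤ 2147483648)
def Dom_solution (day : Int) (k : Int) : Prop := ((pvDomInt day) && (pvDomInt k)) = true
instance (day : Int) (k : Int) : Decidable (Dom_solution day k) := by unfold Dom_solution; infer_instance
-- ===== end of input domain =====

-- B replaces A's accumulate-and-test loop (mutating `day`) by two separate passes: a prefix table of
-- month-start weekday offsets, then a stateless comprehension mapping each offset to 0/1 (alternative decomposition).

-- ===== PORT A =====
def solution (day : Int) (k : Int) : List Int :=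
  let date_per_month : List Int := [31, 28, 31, 30, 31, 30, 31, 31, 30, 31, 30, 31]
  (date_per_month.foldl (fun (st : Int × List Int) date =>
      let appended : Int := if PySem.Int.mod (st.1 + k - 1) 7 = 5 ∨ PySem.Int.mod (st.1 + k - 1) 7 = 6
        then 1 else 0
      (st.1 + PySem.Int.mod date 7, st.2 ++ [appended])) (day, [])).2

-- ===== PORT B =====
def solution_alt (day : Int) (k : Int) : List Int :=
  let date_per_month : List Int := [31, 28, 31, 30, 31, 30, 31, 31, 30, 31, 30, 31]
  let offsets : List Int := date_per_month.dropLast.foldl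
    (fun acc d => acc ++ [acc.getLastD 0 + PySem.Int.mod d 7]) [0]
  offsets.map (fun off =>
    if PySem.Int.mod (day + off + k - 1) 7 = 5 ∨ PySem.Int.mod (day + off + k - 1) 7 = 6
    then 1 else 0)

-- ===== PRECONDITION & SPEC =====
def Spec_solution (day : Int) (k : Int) (out : List Int) : Prop := out = solution_alt day k
instance (day : Int) (k : Int) (out : List Int) : Decidable (Spec_solution day k out) := by unfold Spec_solution; infer_instance

-- ===== CLAIM (what is proved, stated in full; the proofs are below) =====
def Claim_equal_solution : Prop := ∀ (day : Int) (k : Int), Dom_solution day k → Spec_solution day k (solution day k)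

-- ===== LEMMAS AND PROOFS =====

-- month-start day values produced by A's running `day`
def pvStarts (d : Int) : List Int → List Int
  | [] => []
  | x :: xs => d :: pvStarts (d + PySem.Int.mod x 7) xs

-- offsets appended by B's prefix-table loop after an accumulator ending in x
def pvOffs (x : Int) : List Int → List Int
  | [] => []
  | d :: ds => (x + PySem.Int.mod d 7) :: pvOffs (x + PySem.Int.mod d 7) ds

theorem pvFoldA (k : Int) (ds : List Int) (d : Int) (acc : List Int) :
    (ds.foldl (fun (st : Int × List Int) date =>
        let appended : Int := if PySem.Int.mod (st.1 + k - 1) 7 = 5 ∨ PySem.Int.mod (st.1 + k - 1) 7 = 6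
          then 1 else 0
        (st.1 + PySem.Int.mod date 7, st.2 ++ [appended])) (d, acc)).2
    = acc ++ (pvStarts d ds).map (fun s =>
        if PySem.Int.mod (s + k - 1) 7 = 5 ∨ PySem.Int.mod (s + k - 1) 7 = 6 then (1:Int) else 0) := by
  induction ds generalizing d acc with
  | nil => simp [pvStarts]
  | cons x xs ih =>
      simp only [List.foldl_cons]
      rw [ih]
      simp [pvStarts]

theorem pvFoldB (ds : List Int) (pre : List Int) (x : Int) :
    ds.foldl (fun acc d => acc ++ [acc.getLastD 0 + PySem.Int.mod d 7]) (pre ++ [x])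
    = pre ++ [x] ++ pvOffs x ds := by
  induction ds generalizing pre x with
  | nil => simp [pvOffs]
  | cons d rest ih =>
      simp only [List.foldl_cons, pvOffs, List.getLastD_concat]
      rw [show pre ++ [x] ++ [x + PySem.Int.mod d 7] = (pre ++ [x]) ++ [x + PySem.Int.mod d 7] by simp,
          ih]
      simp

theorem pvFoldB0 (ds : List Int) :
    ds.foldl (fun acc d => acc ++ [acc.getLastD 0 + PySem.Int.mod d 7]) [0]
    = 0 :: pvOffs 0 ds := by
  have h := pvFoldB ds [] 0
  simpa using h

theorem pvCondCongr (k x y : Int) (h : x = y) :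
    (if PySem.Int.mod (x + k - 1) 7 = 5 ∨ PySem.Int.mod (x + k - 1) 7 = 6 then (1:Int) else 0) =
    (if PySem.Int.mod (y + k - 1) 7 = 5 ∨ PySem.Int.mod (y + k - 1) 7 = 6 then (1:Int) else 0) := by
  rw [h]

-- ===== VERDICT (by name: the statement is the Claim_ definition above) =====
theorem solution_spec : Claim_equal_solution := by
  intro day k _
  unfold Spec_solution
  have m31 : PySem.Int.mod 31 7 = 3 := by decide
  have m28 : PySem.Int.mod 28 7 = 0 := by decide
  have m30 : PySem.Int.mod 30 7 = 2 := by decide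
  simp only [solution, solution_alt, pvFoldA, pvFoldB0, List.dropLast, pvStarts, pvOffs,
    m31, m28, m30, List.nil_append, List.map_cons, List.map_nil,
    List.cons.injEq, and_true]
  refine ⟨?_,?_,?_,?_,?_,?_,?_,?_,?_,?_,?_,?_⟩ <;>
    · refine pvCondCongr k _ _ ?_
      ring
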